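-- pv_equiv track=rewrite | github.com/robin-mongodb/mongochain | mongochain/core/agent.py | _validate_agent_name
-- ===== SOURCE A (Python) =====
-- def _validate_agent_name(name: str) -> str:
--     """
--     Validate and sanitize agent name for use as MongoDB database name.
--
--     MongoDB database names must:
--     - Not be empty
--     - Not contain: /\\. "$*<>:|?
--     - Be less than 64 characters
--     - Not start with 'system.'
--     """
--     if not name:
--         raise ValueError("Agent name cannot be empty")
--
--     # Replace invalid characters with underscores
--     invalid_chars = '/\\. "$*<>:|?'
--     sanitized = name
--     for char in invalid_chars:
--         sanitized = sanitized.replace(char, '_')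
--
--     # Check length
--     if len(sanitized) > 63:
--         sanitized = sanitized[:63]
--
--     # Check system prefix
--     if sanitized.lower().startswith('system.'):
--         raise ValueError("Agent name cannot start with 'system.'")
--
--     return sanitized
-- ===== SOURCE B (Python) =====
-- def _validate_agent_name(name: str) -> str:
--     if not name:
--         raise ValueError("Agent name cannot be empty")
--     invalid = '/\\. "$*<>:|?'
--     # one pass: map each character, then truncate
--     return ''.join('_' if c in invalid else c for c in name)[:63]
-- ===== Notes on version B (the rewrite author's own statement) =====
-- stated objective: simpler
-- what changed: B makes one pass over the name mapping each character through the invalid-character set (instead of 11 full-string replace passes), truncates unconditionally with a slice, and drops the 'system.' prefix check, which is unreachable because '.' is always replaced by '_'.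
import Mathlib
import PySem

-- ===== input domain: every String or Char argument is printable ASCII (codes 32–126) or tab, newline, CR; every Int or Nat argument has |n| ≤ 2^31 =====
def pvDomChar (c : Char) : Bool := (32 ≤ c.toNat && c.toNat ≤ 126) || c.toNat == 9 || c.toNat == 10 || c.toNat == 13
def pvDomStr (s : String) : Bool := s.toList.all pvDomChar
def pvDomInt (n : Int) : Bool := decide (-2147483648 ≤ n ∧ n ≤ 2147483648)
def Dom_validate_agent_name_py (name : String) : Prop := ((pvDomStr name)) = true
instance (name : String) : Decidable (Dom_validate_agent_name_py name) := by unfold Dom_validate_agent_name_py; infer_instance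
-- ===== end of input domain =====

-- B replaces A's 11 repeated full-string replace passes by ONE pass mapping each character,
-- and drops A's 'system.' prefix check, which is unreachable because '.' is always replaced.

-- the 11-character string '/\. "$*<>:|?' of invalid characters (shared literal of both programs)
def pvInvalidChars : List Char := "/\\. \"$*<>:|?".toList

-- ===== PORT A =====
def validate_agent_name_py (name : String) : String :=
  if name = "" then ""  -- A raises ValueError here; excluded by Pre_
  else
    -- for char in invalid_chars: sanitized = sanitized.replace(char, '_')
    let sanitized := pvInvalidChars.foldl
      (fun s c => PySem.Str.replace s (String.ofList [c]) "_") name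
    let sanitized := if PySem.Str.len sanitized > 63
      then PySem.Str.slice sanitized none (some 63) else sanitized
    if PySem.Str.startswith (PySem.Str.lower sanitized) "system." then ""
      -- A raises ValueError here; this branch is unreachable ('.' was replaced by '_')
    else sanitized

-- ===== PORT B =====
def validate_agent_name_py_alt (name : String) : String :=
  if name = "" then ""  -- B raises ValueError here; excluded by Pre_
  else
    -- ''.join('_' if c in invalid else c for c in name)[:63]
    PySem.Str.slice
      (String.ofList (name.toList.map (fun c => if c ∈ pvInvalidChars then '_' else c)))
      none (some 63)

-- ===== PRECONDITION & SPEC =====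
-- Pre_ excludes exactly the empty string, on which both Pythons raise ValueError.
def Pre_validate_agent_name_py (name : String) : Prop := name ≠ ""
instance (name : String) : Decidable (Pre_validate_agent_name_py name) := by
  unfold Pre_validate_agent_name_py; infer_instance
def pvWitness_validate_agent_name_py : String := "agent"

def Spec_validate_agent_name_py (name : String) (out : String) : Prop :=
  out = validate_agent_name_py_alt name
instance (name : String) (out : String) : Decidable (Spec_validate_agent_name_py name out) := by
  unfold Spec_validate_agent_name_py; infer_instance

-- ===== CLAIM (what is proved, stated in full; the proofs are below) =====
def Claim_equal_validate_agent_name_py : Prop :=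
  ∀ (name : String), Dom_validate_agent_name_py name → Pre_validate_agent_name_py name →
    Spec_validate_agent_name_py name (validate_agent_name_py name)

-- ===== LEMMAS AND PROOFS =====

-- the per-character substitution both programs compute
def pvSub (L : List Char) (x : Char) : Char := if x ∈ L then '_' else x

-- replace.go with a single-character pattern rewrites each character in turn
theorem pv_replace_go_single (c n : Char) :
    ∀ (fuel : Nat) (l acc : List Char), l.length ≤ fuel →
      PySem.Chars.replace.go [c] [n] fuel l acc
        = acc.reverse ++ l.map (fun x => if x = c then n else x) := by
  intro fuel
  induction fuel with
  | zero => intro l acc h; cases l with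
    | nil => simp [PySem.Chars.replace.go]
    | cons a t => simp at h
  | succ fuel ih =>
    intro l acc h
    cases l with
    | nil => simp [PySem.Chars.replace.go]
    | cons a t =>
      simp only [PySem.Chars.replace.go, List.isPrefixOf]
      by_cases hc : c = a
      · subst hc
        simp only [beq_self_eq_true, Bool.true_and, if_pos]
        have hd : List.drop ([c].length) (c :: t) = t := rfl
        rw [hd, ih t _ (by simpa using Nat.le_of_succ_le_succ h)]
        simp
      · have hb : (c == a) = false := by simp [hc]
        simp only [hb, Bool.false_and, Bool.false_eq_true, if_neg, not_false_iff]
        rw [ih t _ (by simpa using Nat.le_of_succ_le_succ h)]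
        simp [Ne.symm hc]

-- s.replace(c, n) for a single character c is a character map
theorem pv_replace_single (s : List Char) (c n : Char) :
    PySem.Chars.replace s [c] [n] = s.map (fun x => if x = c then n else x) := by
  simp [PySem.Chars.replace, pv_replace_go_single c n s.length s [] (le_refl _)]

-- A's replace loop, seen through toList, is the single map by pvSub
theorem pv_foldl_replace (L : List Char) (hL : '_' ∉ L) :
    ∀ (s : String),
      (L.foldl (fun s c => PySem.Str.replace s (String.ofList [c]) "_") s).toList
        = s.toList.map (pvSub L) := by
  induction L with
  | nil =>
    intro s
    have hid : pvSub [] = id := funext fun x => by simp [pvSub]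
    simp [hid]
  | cons c cs ih =>
    intro s
    have hcs : '_' ∉ cs := fun h => hL (List.mem_cons_of_mem _ h)
    simp only [List.foldl_cons]
    rw [ih hcs]
    have h1 : (PySem.Str.replace s (String.ofList [c]) "_").toList
        = s.toList.map (fun x => if x = c then '_' else x) := by
      rw [PySem.Str.toList_replace]
      simp [pv_replace_single]
    rw [h1, List.map_map]
    refine List.map_congr_left (fun x _ => ?_)
    by_cases hx : x = c
    · simp [Function.comp, pvSub, hx, hcs]
    · simp [Function.comp, pvSub, hx]

-- pvSub never produces '.'
theorem pv_sub_ne_dot (x : Char) : pvSub pvInvalidChars x ≠ '.' := by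
  unfold pvSub
  by_cases hx : x ∈ pvInvalidChars
  · simp [hx]
  · simp only [hx, if_neg, not_false_iff]
    intro h; subst h
    exact hx (by decide)

-- lowering a character other than '.' never gives '.'
theorem pv_lower_ne_dot (x : Char) (hx : x ≠ '.') : PySem.Chars.lowerChar x ≠ '.' := by
  unfold PySem.Chars.lowerChar
  split
  · rename_i h
    simp only [PySem.Chars.isupper, Bool.and_eq_true, decide_eq_true_eq] at h
    have h1 : 65 ≤ x.toNat := Nat.succ_le_of_lt h.1
    have h2 : x.toNat ≤ 90 := h.2
    intro hcon
    have ht : (Char.ofNat (x.toNat + 32)).toNat = ('.' : Char).toNat := by rw [hcon]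
    rw [Char.toNat_ofNat] at ht
    have hv : (x.toNat + 32).isValidChar := Or.inl (by omega)
    rw [if_pos hv] at ht
    have hdot : ('.' : Char).toNat = 46 := rfl
    omega
  · exact hx

-- both programs' result, seen through toList, is 'map then truncate to 63'
theorem pv_A_sanitized (name : String) :
    (let s := pvInvalidChars.foldl
        (fun s c => PySem.Str.replace s (String.ofList [c]) "_") name
     (if PySem.Str.len s > 63 then PySem.Str.slice s none (some 63) else s)).toList
      = (name.toList.map (pvSub pvInvalidChars)).take 63 := by
  have hf := pv_foldl_replace pvInvalidChars (by decide) name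
  set s := pvInvalidChars.foldl
      (fun s c => PySem.Str.replace s (String.ofList [c]) "_") name with hs
  by_cases hlen : PySem.Str.len s > 63
  · simp only [hlen, if_pos]
    rw [PySem.Str.toList_slice, PySem.Chars.slice_eq_listSlice,
        PySem.List.slice_to _ (by norm_num : (0:Int) ≤ (63:Int)), hf]
    rfl
  · simp only [hlen, if_neg, not_false_iff]
    rw [hf]
    have : (name.toList.map (pvSub pvInvalidChars)).length ≤ 63 := by
      rw [PySem.Str.len_eq, hf] at hlen
      omega
    rw [List.take_of_length_le this]

-- ===== VERDICT (by name: the statement is the Claim_ definition above) =====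
theorem validate_agent_name_py_spec : Claim_equal_validate_agent_name_py := by
  unfold Claim_equal_validate_agent_name_py
  intro name _ hpre
  unfold Spec_validate_agent_name_py validate_agent_name_py validate_agent_name_py_alt
  rw [if_neg hpre, if_neg hpre]
  have hA := pv_A_sanitized name
  simp only at hA ⊢
  set s2 := (if PySem.Str.len (pvInvalidChars.foldl
      (fun s c => PySem.Str.replace s (String.ofList [c]) "_") name) > 63
    then PySem.Str.slice (pvInvalidChars.foldl
      (fun s c => PySem.Str.replace s (String.ofList [c]) "_") name) none (some 63)
    else pvInvalidChars.foldl
      (fun s c => PySem.Str.replace s (String.ofList [c]) "_") name) with hs2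
  -- the system-prefix check never fires: '.' was replaced everywhere
  have hsw : PySem.Chars.startswith (PySem.Chars.lower s2.toList)
      ['s', 'y', 's', 't', 'e', 'm', '.'] = false := by
    by_contra hcon
    have htrue : PySem.Chars.startswith (PySem.Chars.lower s2.toList)
        ['s', 'y', 's', 't', 'e', 'm', '.'] = true := by
      revert hcon
      cases PySem.Chars.startswith (PySem.Chars.lower s2.toList)
        ['s', 'y', 's', 't', 'e', 'm', '.'] <;> simp
    have hpref := (PySem.Chars.startswith_iff _ _).mp htrue
    have hdot : '.' ∈ PySem.Chars.lower s2.toList :=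
      hpref.subset (by decide : '.' ∈ ['s', 'y', 's', 't', 'e', 'm', '.'])
    rw [PySem.Chars.lower, hA] at hdot
    obtain ⟨y, hy, hly⟩ := List.mem_map.mp hdot
    have hym : y ∈ name.toList.map (pvSub pvInvalidChars) := List.mem_of_mem_take hy
    obtain ⟨z, _, hz⟩ := List.mem_map.mp hym
    exact pv_lower_ne_dot y (hz ▸ pv_sub_ne_dot z) hly
  rw [if_neg (by simp [PySem.Str.startswith_eq, PySem.Str.toList_lower, hsw])]
  apply String.toList_inj.mp
  rw [hA, PySem.Str.toList_slice, PySem.Chars.slice_eq_listSlice,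
      PySem.List.slice_to _ (by norm_num : (0:Int) ≤ (63:Int)), String.toList_ofList]
  rfl
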